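-- pv_equiv track=rewrite | github.com/xlab-ub/py-mlmodelscope | mlharness_tools/process_trace_results.py | compare_analysis_results
-- ===== SOURCE A (Python) =====
-- from collections import defaultdict
--
-- def get_top_metric(metric_list):
--     max_metric = max(metric_list, default=None)
--
--     if max_metric is None:
--         return (0,0)
--
--     max_metric_index = metric_list.index(max_metric)
--
--     return (max_metric_index, max_metric)
--
-- def compare_analysis_results(trace_results, model_names, gpu_trace = True ):
--     """
--     Arguments:
--         trace_results: List of dictionaries containing analysis results from analyze_trace_results
--         metrics_to_compare : List of metrics to compare. If None, compare standard metrics.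
--         gpu_trace: Boolean indicating if there is a GPU trace
--     """
--     # can add metrics_to_compare later for more flexibility
--     # units in microsce seconds
--
--     metrics_to_compare = defaultdict(list)
--
--     basic_metrics = [
--         "avg_batch_evaluation_time",
--         "avg_preprocess_time",
--         "avg_predict_time",
--         "avg_postprocess_time",
--     ]
--
--     # populate metrics_to_compare
--     for metric in basic_metrics:
--         metrics_to_compare[metric]
--
--     # if gpu_trace:
--     #     metrics_to_compare["avg_layer_times"]
--     #     metrics_to_compare["avg_kernel_times"]
--
--     # populate metrics_to_compare with the results from the trace_results
--     for trace in trace_results: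
--         for metric in trace:
--             if metric in metrics_to_compare:
--                 metrics_to_compare[metric].append(trace[metric])
--
--     comparison = {}
--     top_avg_metrics = {}
--
--     for metric in metrics_to_compare:
--         top_metric = get_top_metric(metrics_to_compare[metric])
--         top_avg_metrics[f"top_{metric}"] = f"{model_names[top_metric[0]]}: {top_metric[1]}"
--
--     comparison["basic_comparison"] = top_avg_metrics
--     return comparison
-- ===== SOURCE B (Python) =====
-- def compare_analysis_results(trace_results, model_names, gpu_trace=True):
--     basic_metrics = [
--         "avg_batch_evaluation_time",
--         "avg_preprocess_time",
--         "avg_predict_time",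
--         "avg_postprocess_time",
--     ]
--
--     def top(metric):
--         # one streaming pass: running (position, value) best, strict > keeps first
--         best = None
--         pos = 0
--         for trace in trace_results:
--             if metric in trace:
--                 value = trace[metric]
--                 if best is None or value > best[1]:
--                     best = (pos, value)
--                 pos += 1
--         return best if best is not None else (0, 0)
--
--     top_avg_metrics = {}
--     for metric in basic_metrics:
--         index, value = top(metric)
--         top_avg_metrics[f"top_{metric}"] = f"{model_names[index]}: {value}"
--
--     return {"basic_comparison": top_avg_metrics}
-- ===== Notes on version B (the rewrite author's own statement) =====
-- stated objective: alternative
-- what changed: B replaces A's pipeline (defaultdict of per-metric value lists built from all traces, then max() plus a second .index() scan per metric) by a single streaming pass per metric that maintains a running (position, value) best with strict-greater replacement, so no intermediate lists and no rescans are built.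
import Mathlib
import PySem

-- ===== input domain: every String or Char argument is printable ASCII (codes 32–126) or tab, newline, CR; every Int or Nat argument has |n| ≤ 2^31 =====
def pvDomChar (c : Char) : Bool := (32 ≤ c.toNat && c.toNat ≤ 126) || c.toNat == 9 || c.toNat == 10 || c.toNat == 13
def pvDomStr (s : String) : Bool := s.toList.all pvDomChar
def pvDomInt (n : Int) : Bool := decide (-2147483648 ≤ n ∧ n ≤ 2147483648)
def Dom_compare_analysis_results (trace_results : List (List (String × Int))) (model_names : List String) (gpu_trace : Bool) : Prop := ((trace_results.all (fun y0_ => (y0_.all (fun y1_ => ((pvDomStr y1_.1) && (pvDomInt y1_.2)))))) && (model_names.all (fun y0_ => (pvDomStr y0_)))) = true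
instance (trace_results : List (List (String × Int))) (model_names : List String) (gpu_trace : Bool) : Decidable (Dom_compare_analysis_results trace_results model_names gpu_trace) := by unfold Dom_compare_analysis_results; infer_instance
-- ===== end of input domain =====

-- B replaces A's build-all-value-lists-then-max+.index pipeline by one streaming
-- running-argmax pass per metric (objective: alternative/simpler decomposition;
-- no intermediate per-metric value lists, no defaultdict, no .index rescan).

-- ===== PORT A =====
-- get_top_metric: max(metric_list, default=None), then metric_list.index(max).
-- .index cannot raise here (the max is an element of the list), so the .getD 0
-- in the some-branch never yields its default.
def pvGetTopMetric (metric_list : List Int) : Int × Int :=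
  match PySem.List.max? metric_list (fun x => x) with
  | none => (0, 0)
  | some max_metric =>
      ((((PySem.List.index? metric_list max_metric).getD 0 : Nat) : Int), max_metric)

-- body of 'for metric in trace: if metric in metrics_to_compare: ...append(trace[metric])'
def pvAInner (td : PySem.Dict String Int) (d : PySem.Dict String (List Int))
    (metric : String) : PySem.Dict String (List Int) :=
  if d.contains metric then d.modify metric [] (fun l => l ++ [td.getD metric 0]) else d

-- one iteration of 'for trace in trace_results' (each trace list is read as the Python dict it encodes)
def pvATrace (d : PySem.Dict String (List Int)) (trace : List (String × Int)) :
    PySem.Dict String (List Int) :=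
  let td := PySem.Dict.ofList trace
  td.keys.foldl (pvAInner td) d

-- f'{model_names[idx]}: {val}'; model_names[idx] raises IndexError in Python when idx is out of
-- range — such inputs are excluded by Pre_ below, so the "" default is never produced inside Pre_.
def pvAEntry (d : PySem.Dict String (List Int)) (model_names : List String)
    (metric : String) : String × String :=
  let top_metric := pvGetTopMetric (d.getD metric [])
  ("top_" ++ metric,
   PySem.List.pyGetD model_names top_metric.1 "" ++ ": " ++ PySem.Int.toStr top_metric.2)

def compare_analysis_results (trace_results : List (List (String × Int))) (model_names : List String) (gpu_trace : Bool) : List (String × List (String × String)) :=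
  let basic_metrics : List String :=
    ["avg_batch_evaluation_time", "avg_preprocess_time", "avg_predict_time", "avg_postprocess_time"]
  -- 'metrics_to_compare[metric]' on a defaultdict(list) inserts [] for a missing key = setdefault
  let d0 : PySem.Dict String (List Int) :=
    basic_metrics.foldl (fun d metric => d.setdefault metric []) PySem.Dict.empty
  let dF := trace_results.foldl pvATrace d0
  let top_avg_metrics := dF.keys.foldl (fun acc metric => acc ++ [pvAEntry dF model_names metric]) []
  [("basic_comparison", top_avg_metrics)]

-- ===== PORT B =====
-- running best = (position within the metric's occurrence sequence, value); strict > keeps the first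
def pvBStep (st : Option (Int × Int) × Int) (value : Int) : Option (Int × Int) × Int :=
  match st.1 with
  | none => (some (st.2, value), st.2 + 1)
  | some best => ((if value > best.2 then some (st.2, value) else some best), st.2 + 1)

-- 'if metric in trace: value = trace[metric]; ...'
def pvBTraceStep (metric : String) (st : Option (Int × Int) × Int)
    (trace : List (String × Int)) : Option (Int × Int) × Int :=
  match (PySem.Dict.ofList trace).get? metric with
  | none => st
  | some value => pvBStep st value

-- top(metric): one streaming pass over trace_results; (0, 0) when the metric never occurs
def pvTop (trace_results : List (List (String × Int))) (metric : String) : Int × Int :=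
  ((trace_results.foldl (pvBTraceStep metric) (none, 0)).1).getD (0, 0)

def compare_analysis_results_alt (trace_results : List (List (String × Int))) (model_names : List String) (gpu_trace : Bool) : List (String × List (String × String)) :=
  [("basic_comparison",
    (["avg_batch_evaluation_time", "avg_preprocess_time", "avg_predict_time", "avg_postprocess_time"]
        : List String).map (fun metric =>
      let t := pvTop trace_results metric
      ("top_" ++ metric,
       PySem.List.pyGetD model_names t.1 "" ++ ": " ++ PySem.Int.toStr t.2)))]

-- ===== PRECONDITION & SPEC =====
-- Pre_ excludes exactly the shapes on which model_names[idx] can raise IndexError in Python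
-- (empty model_names, or a basic metric occurring in more traces than there are model names);
-- it is slightly narrower than A's exact return domain (see the claim's cites): when a metric
-- occurs more often than len(model_names) but its first maximum still lands in range, A returns
-- and B returns the same value.
def Pre_compare_analysis_results (trace_results : List (List (String × Int))) (model_names : List String) (gpu_trace : Bool) : Prop :=
  model_names ≠ [] ∧
  ∀ metric ∈ (["avg_batch_evaluation_time", "avg_preprocess_time", "avg_predict_time", "avg_postprocess_time"] : List String),
    trace_results.countP (fun trace => (PySem.Dict.ofList trace).contains metric) ≤ model_names.length
instance (trace_results : List (List (String × Int))) (model_names : List String) (gpu_trace : Bool) : Decidable (Pre_compare_analysis_results trace_results model_names gpu_trace) := by unfold Pre_compare_analysis_results; infer_instance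

def pvWitness_compare_analysis_results : (List (List (String × Int))) × List String × Bool :=
  ([[("avg_predict_time", 3), ("other", 1)], []], ["resnet", "vgg"], true)

def Spec_compare_analysis_results (trace_results : List (List (String × Int))) (model_names : List String) (gpu_trace : Bool) (out : List (String × List (String × String))) : Prop := out = compare_analysis_results_alt trace_results model_names gpu_trace
instance (trace_results : List (List (String × Int))) (model_names : List String) (gpu_trace : Bool) (out : List (String × List (String × String))) : Decidable (Spec_compare_analysis_results trace_results model_names gpu_trace out) := by unfold Spec_compare_analysis_results; infer_instance

-- ===== CLAIM (what is proved, stated in full; the proofs are below) =====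
def Claim_equal_compare_analysis_results : Prop := ∀ (trace_results : List (List (String × Int))) (model_names : List String) (gpu_trace : Bool), Dom_compare_analysis_results trace_results model_names gpu_trace → Pre_compare_analysis_results trace_results model_names gpu_trace → Spec_compare_analysis_results trace_results model_names gpu_trace (compare_analysis_results trace_results model_names gpu_trace)

-- ===== LEMMAS AND PROOFS =====

-- The equality of the two ports is in fact unconditional: where Python would raise the
-- IndexError, both ports build the same out-of-range lookup. The proof therefore never
-- needs Pre_ (Pre_'s role is to delimit where the Python programs return at all).

-- the values of `metric` collected by A across the traces, in order
def pvCollect (metric : String) (traces : List (List (String × Int))) : List Int :=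
  traces.flatMap (fun trace =>
    match (PySem.Dict.ofList trace).get? metric with
    | none => []
    | some v => [v])

lemma pvAInner_keys_foldl (td : PySem.Dict String Int) :
    ∀ (ks : List String) (d : PySem.Dict String (List Int)),
      (ks.foldl (pvAInner td) d).keys = d.keys := by
  intro ks
  induction ks with
  | nil => intro d; rfl
  | cons k ks ih =>
    intro d
    simp only [List.foldl_cons, ih]
    unfold pvAInner
    by_cases h : d.contains k = true
    · simp [h, PySem.Dict.keys_modify, PySem.Dict.keys_insert_of_contains d _ h]
    · simp [h]

lemma pvATrace_keys (d : PySem.Dict String (List Int)) (trace : List (String × Int)) :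
    (pvATrace d trace).keys = d.keys := pvAInner_keys_foldl _ _ d

lemma pvAFold_keys : ∀ (traces : List (List (String × Int))) (d : PySem.Dict String (List Int)),
    (traces.foldl pvATrace d).keys = d.keys := by
  intro traces
  induction traces with
  | nil => intro d; rfl
  | cons t ts ih => intro d; simp only [List.foldl_cons, ih, pvATrace_keys]

lemma pvAInner_getD_foldl (td : PySem.Dict String Int) (m : String) :
    ∀ (ks : List String) (d : PySem.Dict String (List Int)), d.contains m = true →
      (ks.foldl (pvAInner td) d ).getD m [] =
        d.getD m [] ++ (ks.filter (fun k => m == k)).map (fun k => td.getD k 0) := by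
  intro ks
  induction ks with
  | nil => intro d _; simp
  | cons k ks ih =>
    intro d hm
    simp only [List.foldl_cons, List.filter_cons]
    by_cases hk : m = k
    · subst hk
      have hstep : pvAInner td d m = d.modify m [] (fun l => l ++ [td.getD m 0]) := by
        unfold pvAInner; rw [if_pos hm]
      have hc' : (d.modify m [] (fun l => l ++ [td.getD m 0])).contains m = true := by
        rw [PySem.Dict.contains_modify]; simp
      rw [hstep, ih _ hc', PySem.Dict.getD_modify_self]
      simp
    · have hbeq : (m == k) = false := by simp [hk]
      simp only [hbeq, Bool.false_eq_true, if_false]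
      by_cases hc : d.contains k = true
      · have hstep : pvAInner td d k = d.modify k [] (fun l => l ++ [td.getD k 0]) := by
          unfold pvAInner; rw [if_pos hc]
        have hc' : (d.modify k [] (fun l => l ++ [td.getD k 0])).contains m = true := by
          rw [PySem.Dict.contains_modify]; simp [hm]
        rw [hstep, ih _ hc', PySem.Dict.getD_modify_of_ne _ _ _ hk]
      · have hstep : pvAInner td d k = d := by unfold pvAInner; rw [if_neg hc]
        rw [hstep, ih _ hm]

lemma pvFilter_nodup (m : String) :
    ∀ (l : List String), l.Nodup →
      l.filter (fun k => m == k) = if m ∈ l then [m] else [] := by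
  intro l
  induction l with
  | nil => intro _; simp
  | cons k l ih =>
    intro hnd
    rw [List.nodup_cons] at hnd
    simp only [List.filter_cons, List.mem_cons]
    by_cases hk : m = k
    · subst hk
      have : l.filter (fun k => m == k) = [] := by
        rw [ih hnd.2, if_neg hnd.1]
      simp [this]
    · have hbeq : (m == k) = false := by simp [hk]
      simp only [hbeq, Bool.false_eq_true, if_false, ih hnd.2]
      by_cases hmem : m ∈ l <;> simp [hmem, hk]

lemma pvATrace_getD (d : PySem.Dict String (List Int)) (trace : List (String × Int))
    (m : String) (h : d.contains m = true) :
    (pvATrace d trace).getD m [] =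
      d.getD m [] ++ (match (PySem.Dict.ofList trace).get? m with
                      | none => [] | some v => [v]) := by
  unfold pvATrace
  rw [pvAInner_getD_foldl _ _ _ _ h,
      pvFilter_nodup _ _ (PySem.Dict.nodup_keys_ofList trace)]
  by_cases hmem : m ∈ (PySem.Dict.ofList trace).keys
  · have hc : (PySem.Dict.ofList trace).contains m = true :=
      (PySem.Dict.contains_iff_mem_keys _ _).mpr hmem
    have : ∃ v, (PySem.Dict.ofList trace).get? m = some v := by
      rcases hv : (PySem.Dict.ofList trace).get? m with _ | v
      · rw [(PySem.Dict.get?_eq_none_iff_contains _ _).mp hv] at hc; exact absurd hc (by simp)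
      · exact ⟨v, rfl⟩
    rcases this with ⟨v, hv⟩
    simp [hmem, PySem.Dict.getD, hv]
  · have hc : ¬ (PySem.Dict.ofList trace).contains m = true := by
      rw [PySem.Dict.contains_iff_mem_keys]; exact hmem
    have hv : (PySem.Dict.ofList trace).get? m = none := by
      rw [PySem.Dict.get?_eq_none_iff_contains]; simpa using hc
    simp [hmem, hv]

lemma pvAFold_getD : ∀ (traces : List (List (String × Int)))
    (d : PySem.Dict String (List Int)) (m : String), d.contains m = true →
    (traces.foldl pvATrace d).getD m [] = d.getD m [] ++ pvCollect m traces := by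
  intro traces
  induction traces with
  | nil => intro d m _; simp [pvCollect]
  | cons t ts ih =>
    intro d m h
    have hkeys : (pvATrace d t).contains m = true := by
      rw [PySem.Dict.contains_iff_mem_keys, pvATrace_keys,
          ← PySem.Dict.contains_iff_mem_keys]; exact h
    simp only [List.foldl_cons]
    rw [ih _ _ hkeys, pvATrace_getD _ _ _ h]
    simp [pvCollect, List.flatMap_cons]

lemma pvBFold_eq_collect (metric : String) :
    ∀ (traces : List (List (String × Int))) (st : Option (Int × Int) × Int),
      traces.foldl (pvBTraceStep metric) st = (pvCollect metric traces).foldl pvBStep st := by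
  intro traces
  induction traces with
  | nil => intro st; simp [pvCollect]
  | cons t ts ih =>
    intro st
    simp only [List.foldl_cons, pvCollect, List.flatMap_cons, List.foldl_append]
    rw [ih]
    unfold pvBTraceStep
    rcases (PySem.Dict.ofList t).get? metric with _ | v <;> simp [pvCollect]

def pvArg (vs : List Int) (i mx pos : Int) : Int × Int :=
  match vs with
  | [] => (i, mx)
  | v :: t => if mx < v then pvArg t pos v (pos + 1) else pvArg t i mx (pos + 1)

def pvMax1 (a : Int) (l : List Int) : Int := l.foldl (fun m x => if m < x then x else m) a

lemma pvBStep_foldl_some : ∀ (vs : List Int) (i mx pos : Int),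
    (vs.foldl pvBStep (some (i, mx), pos)).1 = some (pvArg vs i mx pos) := by
  intro vs
  induction vs with
  | nil => intro i mx pos; simp [pvArg]
  | cons v t ih =>
    intro i mx pos
    simp only [List.foldl_cons, pvArg]
    by_cases h : mx < v
    · have : pvBStep (some (i, mx), pos) v = (some (pos, v), pos + 1) := by
        simp [pvBStep, h]
      rw [this, ih, if_pos h]
    · have : pvBStep (some (i, mx), pos) v = (some (i, mx), pos + 1) := by
        simp [pvBStep]; intro h'; exact absurd h' h
      rw [this, ih, if_neg h]

lemma pvMax1_cons (a x : Int) (t : List Int) :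
    pvMax1 a (x :: t) = pvMax1 (if a < x then x else a) t := rfl

lemma pvMax1_mem : ∀ (l : List Int) (a : Int), pvMax1 a l = a ∨ pvMax1 a l ∈ l := by
  intro l
  induction l with
  | nil => intro a; left; rfl
  | cons x t ih =>
    intro a
    rw [pvMax1_cons]
    by_cases h : a < x
    · rw [if_pos h]
      rcases ih x with h1 | h1 <;> [right; right] <;> simp [h1]
    · rw [if_neg h]
      rcases ih a with h1 | h1
      · left; exact h1
      · right; simp [h1]

lemma pvMax?_from_some : ∀ (t : List Int) (v : Int),
    PySem.List.max? (v :: t) (fun x => x) = some (pvMax1 v t) := by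
  have key : ∀ (t : List Int) (v : Int),
      PySem.List.max? (v :: t) (fun x => x) = some (pvMax1 v t) := by
    intro t
    induction t with
    | nil => intro v; rfl
    | cons x t ih =>
      intro v
      by_cases h : v < x
      · have h1 : PySem.List.max? (v :: x :: t) (fun y => y) = PySem.List.max? (x :: t) (fun y => y) := by
          simp [PySem.List.max?, h]
        rw [h1, ih]; simp only [pvMax1, List.foldl_cons, if_pos h]
      · have h1 : PySem.List.max? (v :: x :: t) (fun y => y) = PySem.List.max? (v :: t) (fun y => y) := by
          simp [PySem.List.max?, h]
        rw [h1, ih]; simp only [pvMax1, List.foldl_cons, if_neg h]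
  exact key

lemma pvMax1_shift : ∀ (t : List Int) (a b : Int),
    pvMax1 (if a < b then b else a) t = if a < pvMax1 b t then pvMax1 b t else a := by
  intro t
  induction t with
  | nil => intro a b; simp [pvMax1]
  | cons c t ih =>
    intro a b
    rw [pvMax1_cons, pvMax1_cons]
    have harg : (if (if a < b then b else a) < c then c else if a < b then b else a)
        = if a < (if b < c then c else b) then (if b < c then c else b) else a := by
      split_ifs <;> omega
    rw [harg, ih]

lemma pvMax1_eq_max? (v : Int) (t : List Int) :
    pvMax1 v t = match PySem.List.max? t (fun x => x) with
                 | none => v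
                 | some Mt => if v < Mt then Mt else v := by
  cases t with
  | nil => rfl
  | cons w t' =>
    rw [pvMax?_from_some, pvMax1_cons, pvMax1_shift]

lemma pvMax?_mem (t : List Int) (Mt : Int)
    (h : PySem.List.max? t (fun x => x) = some Mt) : Mt ∈ t := by
  cases t with
  | nil => simp [PySem.List.max?] at h
  | cons w t' =>
    rw [pvMax?_from_some] at h
    have hM : Mt = pvMax1 w t' := Option.some_inj.mp h.symm
    rcases pvMax1_mem t' w with h1 | h1
    · rw [hM, h1]; exact List.mem_cons_self
    · rw [hM]; exact List.mem_cons_of_mem _ h1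

lemma pvIdx_cons_self (v : Int) (t : List Int) :
    (List.idxOf? v (v :: t)).getD 0 = 0 := by
  rw [List.idxOf?_cons]; simp

lemma pvIdx_cons_ne (v M : Int) (t : List Int) (hne : v ≠ M) (hmem : M ∈ t) :
    ((List.idxOf? M (v :: t)).getD 0 : Int) = ((List.idxOf? M t).getD 0 : Int) + 1 := by
  rw [List.idxOf?_cons]
  have : (v == M) = false := by simp [hne]
  rw [this]
  simp only [Bool.false_eq_true, if_false]
  rcases Option.isSome_iff_exists.mp (by simp [List.isSome_idxOf?, hmem] :
      (List.idxOf? M t).isSome = true) with ⟨j, hj⟩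
  rw [hj]
  simp

lemma pvArg_spec : ∀ (l : List Int) (i mx pos : Int),
    pvArg l i mx pos =
      match PySem.List.max? l (fun x => x) with
      | none => (i, mx)
      | some M =>
          if mx < M then (pos + (((PySem.List.index? l M).getD 0 : Nat) : Int), M)
          else (i, mx) := by
  intro l
  induction l with
  | nil => intro i mx pos; rfl
  | cons v t ih =>
    intro i mx pos
    rw [pvMax?_from_some]
    simp only [PySem.List.index?]
    have hM := pvMax1_eq_max? v t
    by_cases h : mx < v
    · rw [pvArg, if_pos h, ih]
      rcases hmt : PySem.List.max? t (fun x => x) with _ | Mt <;>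
        rw [hmt] at hM <;> simp only at hM ⊢
      · rw [hM, if_pos h, pvIdx_cons_self]
        norm_num
      · by_cases h2 : v < Mt
        · rw [if_pos h2] at hM ⊢
          rw [hM, if_pos (lt_trans h h2)]
          have hidx := pvIdx_cons_ne v Mt t (by omega) (pvMax?_mem t Mt hmt)
          rw [Prod.mk.injEq]
          refine ⟨?_, rfl⟩
          simp only [PySem.List.index?]
          rw [hidx]
          omega
        · rw [if_neg h2] at hM ⊢
          rw [hM, if_pos h, pvIdx_cons_self]
          norm_num
    · rw [pvArg, if_neg h, ih]
      rcases hmt : PySem.List.max? t (fun x => x) with _ | Mt <;>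
        rw [hmt] at hM <;> simp only at hM ⊢
      · rw [hM, if_neg h]
      · by_cases h2 : mx < Mt
        · rw [if_pos h2]
          have hv : v < Mt := by omega
          rw [if_pos hv] at hM
          rw [hM, if_pos h2]
          have hidx := pvIdx_cons_ne v Mt t (by omega) (pvMax?_mem t Mt hmt)
          rw [Prod.mk.injEq]
          refine ⟨?_, rfl⟩
          simp only [PySem.List.index?]
          rw [hidx]
          omega
        · rw [if_neg h2]
          have hle : ¬ mx < pvMax1 v t := by
            by_cases hv : v < Mt
            · rw [if_pos hv] at hM; omega
            · rw [if_neg hv] at hM; omega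
          rw [if_neg hle]

lemma pvTop_spec (vs : List Int) :
    ((vs.foldl pvBStep ((none : Option (Int × Int)), (0 : Int))).1).getD (0, 0) =
      pvGetTopMetric vs := by
  cases vs with
  | nil => rfl
  | cons v t =>
    have h0 : pvBStep ((none : Option (Int × Int)), (0 : Int)) v = (some (0, v), 1) := rfl
    rw [List.foldl_cons, h0, pvBStep_foldl_some, Option.getD_some, pvArg_spec]
    unfold pvGetTopMetric
    rw [pvMax?_from_some]
    have hM := pvMax1_eq_max? v t
    simp only [PySem.List.index?]
    rcases hmt : PySem.List.max? t (fun x => x) with _ | Mt <;>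
      rw [hmt] at hM <;> simp only at hM ⊢
    · rw [hM, pvIdx_cons_self]
      norm_num
    · by_cases h2 : v < Mt
      · rw [if_pos h2] at hM ⊢
        rw [hM]
        have hidx := pvIdx_cons_ne v Mt t (by omega) (pvMax?_mem t Mt hmt)
        rw [Prod.mk.injEq]
        refine ⟨?_, rfl⟩
        rw [hidx]
        omega
      · rw [if_neg h2] at hM ⊢
        rw [hM, pvIdx_cons_self]
        norm_num

lemma pvTop_eq (trace_results : List (List (String × Int))) (metric : String) :
    pvTop trace_results metric = pvGetTopMetric (pvCollect metric trace_results) := by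
  unfold pvTop
  rw [pvBFold_eq_collect, pvTop_spec]

theorem pv_main (trace_results : List (List (String × Int))) (model_names : List String)
    (gpu_trace : Bool) :
    compare_analysis_results trace_results model_names gpu_trace =
      compare_analysis_results_alt trace_results model_names gpu_trace := by
  have hkeys : (trace_results.foldl pvATrace
      ((["avg_batch_evaluation_time", "avg_preprocess_time", "avg_predict_time", "avg_postprocess_time"]
        : List String).foldl (fun d metric => d.setdefault metric []) PySem.Dict.empty)).keys =
      ["avg_batch_evaluation_time", "avg_preprocess_time", "avg_predict_time", "avg_postprocess_time"] := by
    rw [pvAFold_keys]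
    decide
  have hget : ∀ m ∈ (["avg_batch_evaluation_time", "avg_preprocess_time", "avg_predict_time", "avg_postprocess_time"] : List String),
      (trace_results.foldl pvATrace
        ((((PySem.Dict.empty.setdefault "avg_batch_evaluation_time" []).setdefault
            "avg_preprocess_time" []).setdefault "avg_predict_time" []).setdefault
            "avg_postprocess_time" [])).getD m [] =
        pvCollect m trace_results := by
    intro m hm
    rw [pvAFold_getD _ _ _ (by fin_cases hm <;> decide)]
    fin_cases hm <;> rfl
  simp only [compare_analysis_results, compare_analysis_results_alt, hkeys]
  simp only [List.foldl_cons, List.foldl_nil, List.map_cons, List.map_nil]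
  simp only [pvAEntry, pvTop_eq]
  rw [hget "avg_batch_evaluation_time" (by decide), hget "avg_preprocess_time" (by decide),
      hget "avg_predict_time" (by decide), hget "avg_postprocess_time" (by decide)]
  simp

-- ===== VERDICT (by name: the statement is the Claim_ definition above) =====
theorem compare_analysis_results_spec : Claim_equal_compare_analysis_results := by
  intro trace_results model_names gpu_trace _ _
  exact pv_main trace_results model_names gpu_trace
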